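-- pv_equiv track=rewrite | github.com/SaintLawrenceIslandYupik/finite_state_morphology | make-lexc-files/methods.py | convert_to_c_v
-- ===== SOURCE A (Python) =====
-- def tokenize(word):
--     '''
--     :param word: the word to tokenize into graphemes
--     :type word: str
--
--     :return: list
--
--     Tokenizes a given Yupik word into its respective graphemes
--
--     '''
--     GRAPHEMES = ['Ngngw', 'ngngw', 'Ghhw', 'ghhw', 'Ngng', 'ngng',
--                  'Ghh', 'gh', 'Ghw', 'ghw', 'Ngw', 'ngw',
--                  'Gg', 'gg', 'Gh', 'gh', 'Kw', 'kw', 'Ll', 'll',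
--                  'Mm', 'mm', 'Ng', 'ng', 'Nn', 'nn', 'Qw', 'qw',
--                  'Rr', 'rr', 'Wh', 'wh',
--                  'Aa', 'aa', 'Ii', 'ii', 'Uu', 'uu',
--                  'A', 'a', 'E', 'e', 'F', 'f', 'G', 'g', 'H', 'h',
--                  'I', 'i', 'K', 'k', 'L', 'l', 'M', 'm', 'N', 'n',
--                  'P', 'p', 'Q', 'q', 'R', 'r', 'S', 's', 'T', 't',
--                  'U', 'u', 'V', 'v', 'W', 'w', 'Y', 'y', 'Z', 'z']
--
--     result = []
--
--     end = len(word)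
--     while end > 0:
--         foundGrapheme = False
--
--         # attempts to greedy match graphemes starting
--         # from the end of the word
--         for grapheme in GRAPHEMES:
--             if word.endswith(grapheme, 0, end):
--                 result.insert(0, grapheme)
--                 end -= len(grapheme)
--                 foundGrapheme = True
--                 break
--
--         # if a grapheme was not found, just prepend
--         # the character to the final result
--         if not foundGrapheme:
--             result.insert(0, word[end-1:end])
--             end -= 1
--
--     return result
--
-- def convert_to_c_v(word):
--     '''
--     :param word: the word to convert
--     :type word: str
--
--     :return: list
--
--     Converts the given word into C(onsonant)'s and V(owel)'s
--
--     '''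
--     CONSONANTS = ['Ngngw', 'ngngw', 'Ghhw', 'ghhw', 'Ngng', 'ngng',
--                  'Ghh', 'gh', 'Ghw', 'ghw', 'Ngw', 'ngw',
--                  'Gg', 'gg', 'Gh', 'gh', 'Kw', 'kw', 'Ll', 'll',
--                  'Mm', 'mm', 'Ng', 'ng', 'Nn', 'nn', 'Qw', 'qw',
--                  'Rr', 'rr', 'Wh', 'wh',
--                  'F', 'f', 'G', 'g', 'H', 'h', 'K', 'k', 'L', 'l',
--                  'M', 'm', 'N', 'n', 'P', 'p', 'Q', 'q', 'R', 'r',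
--                  'S', 's', 'T', 't', 'V', 'v', 'W', 'w', 'Y', 'y', 'Z', 'z']
--
--     VOWELS = ['Aa', 'aa', 'Ii', 'ii', 'Uu', 'uu',
--               'A', 'a', 'I', 'i', 'U', 'u', 'E', 'e']
--
--     tokenized = tokenize(word)
--
--     result = []
--
--     for grapheme in tokenized:
--         if grapheme in CONSONANTS:
--             result.append("C")
--         elif grapheme in VOWELS:
--             result.append("V")
--         else:
--             result.append(grapheme)
--
--     return result
-- ===== SOURCE B (Python) =====
-- def convert_to_c_v(word):
--     '''
--     :param word: the word to convert
--     :type word: str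
--
--     :return: list
--
--     Converts the given word into C(onsonant)'s and V(owel)'s.
--
--     Single backward pass: greedy longest-match (lengths 5..1) against a
--     grapheme->class dictionary, classifying each grapheme immediately.
--     '''
--     CLASS = {}
--     for g in ['Ngngw', 'ngngw', 'Ghhw', 'ghhw', 'Ngng', 'ngng',
--               'Ghh', 'gh', 'Ghw', 'ghw', 'Ngw', 'ngw',
--               'Gg', 'gg', 'Gh', 'gh', 'Kw', 'kw', 'Ll', 'll',
--               'Mm', 'mm', 'Ng', 'ng', 'Nn', 'nn', 'Qw', 'qw',
--               'Rr', 'rr', 'Wh', 'wh',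
--               'F', 'f', 'G', 'g', 'H', 'h', 'K', 'k', 'L', 'l',
--               'M', 'm', 'N', 'n', 'P', 'p', 'Q', 'q', 'R', 'r',
--               'S', 's', 'T', 't', 'V', 'v', 'W', 'w', 'Y', 'y', 'Z', 'z']:
--         CLASS[g] = "C"
--     for g in ['Aa', 'aa', 'Ii', 'ii', 'Uu', 'uu',
--               'A', 'a', 'I', 'i', 'U', 'u', 'E', 'e']:
--         CLASS[g] = "V"
--
--     out = []
--     end = len(word)
--     while end > 0:
--         matched = None
--         for L in (5, 4, 3, 2, 1):
--             if L <= end and word[end - L:end] in CLASS: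
--                 matched = L
--                 break
--         if matched is None:
--             out.append(word[end - 1:end])
--             end -= 1
--         else:
--             out.append(CLASS[word[end - matched:end]])
--             end -= matched
--     out.reverse()
--     return out
-- ===== Notes on version B (the rewrite author's own statement) =====
-- stated objective: alternative
-- what changed: Replaces tokenize-then-classify (two passes, inner linear scan of 76 graphemes per step) with a single backward pass doing longest-match (lengths 5..1) against a grapheme-to-class dictionary, classifying each grapheme immediately and never building the token list.
import Mathlib
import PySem

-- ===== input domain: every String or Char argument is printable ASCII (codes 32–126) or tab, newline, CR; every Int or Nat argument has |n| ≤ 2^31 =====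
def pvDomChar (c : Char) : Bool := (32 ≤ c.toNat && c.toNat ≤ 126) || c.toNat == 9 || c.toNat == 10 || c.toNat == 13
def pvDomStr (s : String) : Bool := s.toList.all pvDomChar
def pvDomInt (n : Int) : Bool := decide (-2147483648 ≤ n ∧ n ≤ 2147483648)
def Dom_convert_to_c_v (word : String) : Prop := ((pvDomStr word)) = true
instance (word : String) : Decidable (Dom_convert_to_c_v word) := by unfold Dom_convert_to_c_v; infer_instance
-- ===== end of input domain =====

-- B replaces A's tokenize-then-classify two-pass with a single backward longest-match pass over a
-- grapheme → class dictionary (alternative decomposition; the token list is never built).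

-- ===== PORT A =====

def pvGRAPHEMES : List String :=
  ["Ngngw", "ngngw", "Ghhw", "ghhw", "Ngng", "ngng",
   "Ghh", "gh", "Ghw", "ghw", "Ngw", "ngw",
   "Gg", "gg", "Gh", "gh", "Kw", "kw", "Ll", "ll",
   "Mm", "mm", "Ng", "ng", "Nn", "nn", "Qw", "qw",
   "Rr", "rr", "Wh", "wh",
   "Aa", "aa", "Ii", "ii", "Uu", "uu",
   "A", "a", "E", "e", "F", "f", "G", "g", "H", "h",
   "I", "i", "K", "k", "L", "l", "M", "m", "N", "n",
   "P", "p", "Q", "q", "R", "r", "S", "s", "T", "t",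
   "U", "u", "V", "v", "W", "w", "Y", "y", "Z", "z"]

-- cited by the ports' decreasing_by: every grapheme is nonempty
theorem pvGrapheme_len_pos : ∀ g ∈ pvGRAPHEMES, 0 < g.toList.length := by decide

-- the `while end > 0` loop of tokenize; `result.insert(0, …)` is the prepend onto `acc`, the
-- for-with-break over GRAPHEMES is List.find?.
-- `word.endswith(grapheme, 0, end)` = `word[:end].endswith(grapheme)` for 0 ≤ end ≤ len(word): exact here.
-- `word[end-1:end]` = drop (end-1) (take end word) for 1 ≤ end ≤ len(word): exact here.
def pvTokenizeAux (cs : List Char) (e : Nat) (acc : List String) : List String :=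
  if he : e = 0 then acc
  else
    match hf : pvGRAPHEMES.find? (fun g => PySem.Chars.endswith (List.take e cs) g.toList) with
    | some g => pvTokenizeAux cs (e - g.toList.length) (g :: acc)
    | none => pvTokenizeAux cs (e - 1) (String.ofList (List.drop (e - 1) (List.take e cs)) :: acc)
termination_by e
decreasing_by
  · have := pvGrapheme_len_pos _ (List.mem_of_find?_eq_some hf)
    omega
  · omega

def pvTokenize (word : String) : List String :=
  pvTokenizeAux word.toList word.toList.length []

def pvCONSONANTS : List String :=
  ["Ngngw", "ngngw", "Ghhw", "ghhw", "Ngng", "ngng",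
   "Ghh", "gh", "Ghw", "ghw", "Ngw", "ngw",
   "Gg", "gg", "Gh", "gh", "Kw", "kw", "Ll", "ll",
   "Mm", "mm", "Ng", "ng", "Nn", "nn", "Qw", "qw",
   "Rr", "rr", "Wh", "wh",
   "F", "f", "G", "g", "H", "h", "K", "k", "L", "l",
   "M", "m", "N", "n", "P", "p", "Q", "q", "R", "r",
   "S", "s", "T", "t", "V", "v", "W", "w", "Y", "y", "Z", "z"]

def pvVOWELS : List String :=
  ["Aa", "aa", "Ii", "ii", "Uu", "uu",
   "A", "a", "I", "i", "U", "u", "E", "e"]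

def convert_to_c_v (word : String) : List String :=
  let tokenized := pvTokenize word
  tokenized.foldl
    (fun result grapheme =>
      result ++ [if pvCONSONANTS.contains grapheme then "C"
                 else if pvVOWELS.contains grapheme then "V"
                 else grapheme]) []

-- ===== PORT B =====

-- the CLASS dict of Source B, built by the same two insertion loops
def pvCLASS : PySem.Dict String String :=
  (["Aa", "aa", "Ii", "ii", "Uu", "uu",
    "A", "a", "I", "i", "U", "u", "E", "e"] : List String).foldl
    (fun d g => d.insert g "V")
    ((["Ngngw", "ngngw", "Ghhw", "ghhw", "Ngng", "ngng",
       "Ghh", "gh", "Ghw", "ghw", "Ngw", "ngw",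
       "Gg", "gg", "Gh", "gh", "Kw", "kw", "Ll", "ll",
       "Mm", "mm", "Ng", "ng", "Nn", "nn", "Qw", "qw",
       "Rr", "rr", "Wh", "wh",
       "F", "f", "G", "g", "H", "h", "K", "k", "L", "l",
       "M", "m", "N", "n", "P", "p", "Q", "q", "R", "r",
       "S", "s", "T", "t", "V", "v", "W", "w", "Y", "y",
       "Z", "z"] : List String).foldl
      (fun d g => d.insert g "C") PySem.Dict.empty)

-- the `while end > 0` loop of Source B; the for-with-break over (5,4,3,2,1) is List.find?.
-- `word[end-L:end]` = drop (end-L) (take end word) for L ≤ end ≤ len(word): exact here (the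
-- `L <= end` conjunct guards it exactly as in Source B); `CLASS[s]` with s a present key = getD s "".
def pvAltAux (cs : List Char) (e : Nat) (out : List String) : List String :=
  if he : e = 0 then out
  else
    match hf : ([5, 4, 3, 2, 1] : List Nat).find?
        (fun L => decide (L ≤ e) &&
          (pvCLASS.get? (String.ofList (List.drop (e - L) (List.take e cs)))).isSome) with
    | some L =>
        pvAltAux cs (e - L)
          (out ++ [pvCLASS.getD (String.ofList (List.drop (e - L) (List.take e cs))) ""])
    | none => pvAltAux cs (e - 1) (out ++ [String.ofList (List.drop (e - 1) (List.take e cs))])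
termination_by e
decreasing_by
  · have hm := List.mem_of_find?_eq_some hf
    simp at hm
    omega
  · omega

def convert_to_c_v_alt (word : String) : List String :=
  (pvAltAux word.toList word.toList.length []).reverse

-- ===== PRECONDITION & SPEC =====
def Spec_convert_to_c_v (word : String) (out : List String) : Prop := out = convert_to_c_v_alt word
instance (word : String) (out : List String) : Decidable (Spec_convert_to_c_v word out) := by unfold Spec_convert_to_c_v; infer_instance

-- ===== CLAIM (what is proved, stated in full; the proofs are below) =====
def Claim_equal_convert_to_c_v : Prop := ∀ (word : String), Dom_convert_to_c_v word → Spec_convert_to_c_v word (convert_to_c_v word)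

-- ===== LEMMAS AND PROOFS =====

-- A's classification of a single token
def pvClassify (g : String) : String :=
  if pvCONSONANTS.contains g then "C" else if pvVOWELS.contains g then "V" else g

-- concrete facts about the two programs' literal tables
theorem pv_pairwise_no_suffix :
    List.Pairwise (fun x y : String => ¬(x.toList <:+ y.toList ∧ x ≠ y)) pvGRAPHEMES := by
  decide

set_option maxRecDepth 10000 in
theorem pv_keys_sub : ∀ s ∈ pvCLASS.keys, s ∈ pvGRAPHEMES := by decide

set_option maxRecDepth 10000 in
theorem pv_graphemes_in_class : ∀ g ∈ pvGRAPHEMES, (pvCLASS.get? g).isSome := by decide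

set_option maxRecDepth 10000 in
theorem pv_classify_eq_getD : ∀ g ∈ pvGRAPHEMES, pvCLASS.getD g "" = pvClassify g := by decide

theorem pv_len_bounds : ∀ g ∈ pvGRAPHEMES, 1 ≤ g.toList.length ∧ g.toList.length ≤ 5 := by decide

theorem pv_cons_sub : ∀ g ∈ pvCONSONANTS, g ∈ pvGRAPHEMES := by decide

theorem pv_vow_sub : ∀ g ∈ pvVOWELS, g ∈ pvGRAPHEMES := by decide

-- a present dict key is a member of keys
theorem pv_mem_keys_of_isSome {d : PySem.Dict String String} {k : String}
    (h : (d.get? k).isSome) : k ∈ d.keys := by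
  by_contra hn
  rw [← PySem.Dict.get?_eq_none_iff_not_mem_keys] at hn
  simp [hn] at h

-- the matched suffix string of length L is a grapheme and a suffix of the live prefix
theorem pv_suffix_facts (cs : List Char) (e L : Nat) (h2 : e ≤ cs.length) (hLe : L ≤ e)
    (hs : (pvCLASS.get? (String.ofList (List.drop (e - L) (List.take e cs)))).isSome) :
    (String.ofList (List.drop (e - L) (List.take e cs))) ∈ pvGRAPHEMES ∧
    (String.ofList (List.drop (e - L) (List.take e cs))).toList <:+ List.take e cs ∧
    (String.ofList (List.drop (e - L) (List.take e cs))).toList.length = L := by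
  refine ⟨pv_keys_sub _ (pv_mem_keys_of_isSome hs), ?_, ?_⟩
  · rw [String.toList_ofList]
    exact List.drop_suffix _ _
  · rw [String.toList_ofList, List.length_drop, List.length_take]
    omega

-- step lemma, no-match case: if no grapheme matches at `e`, B's length search fails too
theorem pv_step_none (cs : List Char) (e : Nat) (h2 : e ≤ cs.length)
    (hA : pvGRAPHEMES.find? (fun g => PySem.Chars.endswith (List.take e cs) g.toList) = none) :
    ([5, 4, 3, 2, 1] : List Nat).find?
      (fun L => decide (L ≤ e) &&
        (pvCLASS.get? (String.ofList (List.drop (e - L) (List.take e cs)))).isSome) = none := by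
  rw [List.find?_eq_none] at hA ⊢
  intro L _
  by_contra hc
  rw [Bool.and_eq_true, decide_eq_true_eq] at hc
  obtain ⟨hLe, hs⟩ := hc
  obtain ⟨hmem, hsuf, _⟩ := pv_suffix_facts cs e L h2 hLe hs
  exact hA _ hmem (by simpa [PySem.Chars.endswith_iff] using hsuf)

-- step lemma, match case: A's first listed match is B's longest dictionary match
theorem pv_step_some (cs : List Char) (e : Nat) (h2 : e ≤ cs.length) (g : String)
    (hA : pvGRAPHEMES.find? (fun g => PySem.Chars.endswith (List.take e cs) g.toList) = some g) :
    ([5, 4, 3, 2, 1] : List Nat).find?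
      (fun L => decide (L ≤ e) &&
        (pvCLASS.get? (String.ofList (List.drop (e - L) (List.take e cs)))).isSome)
      = some g.toList.length ∧
    String.ofList (List.drop (e - g.toList.length) (List.take e cs)) = g := by
  obtain ⟨hpg, as, bs, hsplit, hprev⟩ := List.find?_eq_some_iff_append.mp hA
  have hgmem : g ∈ pvGRAPHEMES := by rw [hsplit]; simp
  have hsuf : g.toList <:+ List.take e cs := by
    simpa [PySem.Chars.endswith_iff] using hpg
  have htlen : (List.take e cs).length = e := by rw [List.length_take]; omega
  have hlen : g.toList.length ≤ e := by
    have := hsuf.length_le; omega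
  have hdrop : List.drop (e - g.toList.length) (List.take e cs) = g.toList := by
    have h := List.suffix_iff_eq_drop.mp hsuf
    rw [htlen] at h
    exact h.symm
  have hstr : String.ofList (List.drop (e - g.toList.length) (List.take e cs)) = g := by
    rw [hdrop, String.ofList_toList]
  refine ⟨?_, hstr⟩
  -- B's predicate holds at g's length …
  have hB0 : (decide (g.toList.length ≤ e) &&
      (pvCLASS.get? (String.ofList (List.drop (e - g.toList.length) (List.take e cs)))).isSome)
      = true := by
    rw [hstr]
    simp only [Bool.and_eq_true, decide_eq_true_eq]
    exact ⟨hlen, by simpa using pv_graphemes_in_class g hgmem⟩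
  -- … and fails at every larger length
  have hmax : ∀ L, g.toList.length < L →
      (decide (L ≤ e) &&
        (pvCLASS.get? (String.ofList (List.drop (e - L) (List.take e cs)))).isSome) = false := by
    intro L hgt
    by_contra hc
    rw [Bool.not_eq_false, Bool.and_eq_true, decide_eq_true_eq] at hc
    obtain ⟨hLe, hs⟩ := hc
    obtain ⟨hmem, hsufs, hslen⟩ := pv_suffix_facts cs e L h2 hLe hs
    set s := String.ofList (List.drop (e - L) (List.take e cs)) with hsdef
    have hgs : g.toList <:+ s.toList :=
      List.suffix_of_suffix_length_le hsuf hsufs (by omega)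
    have hne : g ≠ s := by
      intro hEq
      rw [hEq] at hgt
      omega
    -- s matches A's predicate, so s is not earlier than g; pairwise-no-suffix forbids it later
    have hsmatch : PySem.Chars.endswith (List.take e cs) s.toList = true := by
      simpa [PySem.Chars.endswith_iff] using hsufs
    have hsplit' := hsplit
    rw [hsplit'] at hmem
    rcases List.mem_append.mp hmem with hin | hin
    · exact absurd hsmatch (by simpa using hprev s hin)
    · rcases List.mem_cons.mp hin with hEq | hin
      · exact hne hEq.symm
      · have pw := pv_pairwise_no_suffix
        rw [hsplit'] at pw
        obtain ⟨-, pwc, -⟩ := List.pairwise_append.mp pw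
        exact (List.pairwise_cons.mp pwc).1 s hin ⟨hgs, hne⟩
  have hb := pv_len_bounds g hgmem
  have hcases : g.toList.length = 1 ∨ g.toList.length = 2 ∨ g.toList.length = 3 ∨
      g.toList.length = 4 ∨ g.toList.length = 5 := by omega
  rcases hcases with h | h | h | h | h <;> rw [h] <;> rw [h] at hB0 hmax
  · simp [List.find?, hB0, hmax 5 (by omega), hmax 4 (by omega), hmax 3 (by omega),
      hmax 2 (by omega)]
  · simp [List.find?, hB0, hmax 5 (by omega), hmax 4 (by omega), hmax 3 (by omega)]
  · simp [List.find?, hB0, hmax 5 (by omega), hmax 4 (by omega)]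
  · simp [List.find?, hB0, hmax 5 (by omega)]
  · simp [List.find?, hB0]

-- one-step unfolding equations for the two loops
theorem pv_tokAux_step_some (cs : List Char) (e : Nat) (acc : List String) (g : String)
    (he : ¬ e = 0)
    (hf : pvGRAPHEMES.find? (fun g => PySem.Chars.endswith (List.take e cs) g.toList) = some g) :
    pvTokenizeAux cs e acc = pvTokenizeAux cs (e - g.toList.length) (g :: acc) := by
  conv_lhs => rw [pvTokenizeAux]
  simp only [he, dite_false]
  split
  · rename_i g' hf'
    rw [hf] at hf'
    injection hf' with h
    rw [h]
  · rename_i hf'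
    rw [hf] at hf'
    cases hf'

theorem pv_tokAux_step_none (cs : List Char) (e : Nat) (acc : List String)
    (he : ¬ e = 0)
    (hf : pvGRAPHEMES.find? (fun g => PySem.Chars.endswith (List.take e cs) g.toList) = none) :
    pvTokenizeAux cs e acc =
      pvTokenizeAux cs (e - 1) (String.ofList (List.drop (e - 1) (List.take e cs)) :: acc) := by
  conv_lhs => rw [pvTokenizeAux]
  simp only [he, dite_false]
  split
  · rename_i g' hf'
    rw [hf] at hf'
    cases hf'
  · rfl

theorem pv_altAux_step_some (cs : List Char) (e : Nat) (out : List String) (L : Nat)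
    (he : ¬ e = 0)
    (hf : ([5, 4, 3, 2, 1] : List Nat).find?
      (fun L => decide (L ≤ e) &&
        (pvCLASS.get? (String.ofList (List.drop (e - L) (List.take e cs)))).isSome) = some L) :
    pvAltAux cs e out =
      pvAltAux cs (e - L)
        (out ++ [pvCLASS.getD (String.ofList (List.drop (e - L) (List.take e cs))) ""]) := by
  conv_lhs => rw [pvAltAux]
  simp only [he, dite_false]
  split
  · rename_i L' hf'
    rw [hf] at hf'
    injection hf' with h
    rw [h]
  · rename_i hf'
    rw [hf] at hf'
    cases hf'

theorem pv_altAux_step_none (cs : List Char) (e : Nat) (out : List String)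
    (he : ¬ e = 0)
    (hf : ([5, 4, 3, 2, 1] : List Nat).find?
      (fun L => decide (L ≤ e) &&
        (pvCLASS.get? (String.ofList (List.drop (e - L) (List.take e cs)))).isSome) = none) :
    pvAltAux cs e out =
      pvAltAux cs (e - 1) (out ++ [String.ofList (List.drop (e - 1) (List.take e cs))]) := by
  conv_lhs => rw [pvAltAux]
  simp only [he, dite_false]
  split
  · rename_i L' hf'
    rw [hf] at hf'
    cases hf'
  · rfl

theorem pv_tokAux_zero (cs : List Char) (acc : List String) : pvTokenizeAux cs 0 acc = acc := by
  rw [pvTokenizeAux]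
  simp

theorem pv_altAux_zero (cs : List Char) (out : List String) : pvAltAux cs 0 out = out := by
  rw [pvAltAux]
  simp

-- accumulator generalisations of the two loops
theorem pvTokenizeAux_acc (cs : List Char) :
    ∀ e acc, pvTokenizeAux cs e acc = pvTokenizeAux cs e [] ++ acc := by
  intro e
  induction e using Nat.strong_induction_on with
  | _ e ih =>
    intro acc
    by_cases he : e = 0
    · subst he
      rw [pv_tokAux_zero, pv_tokAux_zero]
      simp
    · cases hf : pvGRAPHEMES.find? (fun g => PySem.Chars.endswith (List.take e cs) g.toList) with
      | some g =>
        have hgl := pvGrapheme_len_pos _ (List.mem_of_find?_eq_some hf)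
        rw [pv_tokAux_step_some cs e acc g he hf, pv_tokAux_step_some cs e [] g he hf,
          ih (e - g.toList.length) (by omega) (g :: acc),
          ih (e - g.toList.length) (by omega) [g]]
        simp
      | none =>
        rw [pv_tokAux_step_none cs e acc he hf, pv_tokAux_step_none cs e [] he hf,
          ih (e - 1) (by omega) (String.ofList (List.drop (e - 1) (List.take e cs)) :: acc),
          ih (e - 1) (by omega) [String.ofList (List.drop (e - 1) (List.take e cs))]]
        simp

theorem pvAltAux_acc (cs : List Char) :
    ∀ e out, pvAltAux cs e out = out ++ pvAltAux cs e [] := by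
  intro e
  induction e using Nat.strong_induction_on with
  | _ e ih =>
    intro out
    by_cases he : e = 0
    · subst he
      rw [pv_altAux_zero, pv_altAux_zero]
      simp
    · cases hf : ([5, 4, 3, 2, 1] : List Nat).find?
          (fun L => decide (L ≤ e) &&
            (pvCLASS.get? (String.ofList (List.drop (e - L) (List.take e cs)))).isSome) with
      | some L =>
        have hm := List.mem_of_find?_eq_some hf
        have hL : 0 < L := by simp at hm; omega
        rw [pv_altAux_step_some cs e out L he hf, pv_altAux_step_some cs e [] L he hf,
          ih (e - L) (by omega)
            (out ++ [pvCLASS.getD (String.ofList (List.drop (e - L) (List.take e cs))) ""]),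
          ih (e - L) (by omega)
            ([] ++ [pvCLASS.getD (String.ofList (List.drop (e - L) (List.take e cs))) ""])]
        simp
      | none =>
        rw [pv_altAux_step_none cs e out he hf, pv_altAux_step_none cs e [] he hf,
          ih (e - 1) (by omega) (out ++ [String.ofList (List.drop (e - 1) (List.take e cs))]),
          ih (e - 1) (by omega) ([] ++ [String.ofList (List.drop (e - 1) (List.take e cs))])]
        simp

-- the unmatched fallback character is classified as itself
theorem pv_fallback_classify (cs : List Char) (e : Nat)
    (hA : pvGRAPHEMES.find? (fun g => PySem.Chars.endswith (List.take e cs) g.toList) = none) :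
    pvClassify (String.ofList (List.drop (e - 1) (List.take e cs)))
      = String.ofList (List.drop (e - 1) (List.take e cs)) := by
  rw [List.find?_eq_none] at hA
  set c := String.ofList (List.drop (e - 1) (List.take e cs)) with hc
  have hcsuf : PySem.Chars.endswith (List.take e cs) c.toList = true := by
    rw [hc, String.toList_ofList]
    simp [PySem.Chars.endswith_iff, List.drop_suffix]
  have h1 : ¬ c ∈ pvCONSONANTS := fun h => hA c (pv_cons_sub c h) hcsuf
  have h2 : ¬ c ∈ pvVOWELS := fun h => hA c (pv_vow_sub c h) hcsuf
  simp [pvClassify, h1, h2]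

-- main loop invariant: classifying A's token list equals B's reversed output
theorem pv_main_loop (cs : List Char) :
    ∀ e, e ≤ cs.length →
      List.map pvClassify (pvTokenizeAux cs e []) = (pvAltAux cs e []).reverse := by
  intro e
  induction e using Nat.strong_induction_on with
  | _ e ih =>
    intro h2
    by_cases he : e = 0
    · subst he
      rw [pv_tokAux_zero, pv_altAux_zero]
      rfl
    · cases hf : pvGRAPHEMES.find? (fun g => PySem.Chars.endswith (List.take e cs) g.toList) with
      | some g =>
        obtain ⟨hB, hstr⟩ := pv_step_some cs e h2 g hf
        have hgl := pvGrapheme_len_pos _ (List.mem_of_find?_eq_some hf)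
        rw [pv_tokAux_step_some cs e [] g he hf, pv_altAux_step_some cs e [] _ he hB,
          pvTokenizeAux_acc cs _ [g], pvAltAux_acc cs _ ([] ++ [_]),
          List.map_append, ih (e - g.toList.length) (by omega) (by omega)]
        simp only [List.map_cons, List.map_nil, List.nil_append, List.reverse_append,
          List.reverse_cons, List.reverse_nil, List.nil_append]
        rw [hstr, pv_classify_eq_getD g (List.mem_of_find?_eq_some hf)]
      | none =>
        have hB := pv_step_none cs e h2 hf
        rw [pv_tokAux_step_none cs e [] he hf, pv_altAux_step_none cs e [] he hB,
          pvTokenizeAux_acc cs _ [_], pvAltAux_acc cs _ ([] ++ [_]),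
          List.map_append, ih (e - 1) (by omega) (by omega)]
        simp only [List.map_cons, List.map_nil, List.nil_append, List.reverse_append,
          List.reverse_cons, List.reverse_nil, List.nil_append]
        rw [pv_fallback_classify cs e hf]

-- A's classification fold is a map
theorem pv_fold_is_map (l : List String) :
    l.foldl
      (fun result grapheme =>
        result ++ [if pvCONSONANTS.contains grapheme then "C"
                   else if pvVOWELS.contains grapheme then "V"
                   else grapheme]) []
      = List.map pvClassify l := by
  simpa [pvClassify] using
    PySem.List.foldl_append_singleton_eq_map (f := pvClassify) (l := l)

-- ===== VERDICT (by name: the statement is the Claim_ definition above) =====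
theorem convert_to_c_v_spec : Claim_equal_convert_to_c_v := by
  intro word _
  unfold Spec_convert_to_c_v convert_to_c_v convert_to_c_v_alt pvTokenize
  rw [pv_fold_is_map]
  exact pv_main_loop word.toList word.toList.length (le_refl _)
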